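-- pv_equiv track=rewrite | github.com/ppkantorski/Mod-Alchemist | scripts/theboy181/format_repo4.py | capitalize_hyphenated
-- ===== SOURCE A (Python) =====
-- def capitalize_hyphenated(word):
--     """
--     Capitalize both parts of a hyphenated word. E.g. "yooka-laylee" → "Yooka-Laylee".
--     """
--     parts = word.split('-')
--     capitalized = []
--     for part in parts:
--         if part:
--             capitalized.append(part[0].upper() + part[1:].lower() if len(part) > 1 else part.upper())
--         else:
--             capitalized.append('')
--     return '-'.join(capitalized)
-- ===== SOURCE B (Python) =====
-- def capitalize_hyphenated(word):
--     """
--     Capitalize both parts of a hyphenated word, in one linear pass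
--     (no split/join): a char right after the start or a hyphen is
--     uppercased, every other non-hyphen char is lowercased.
--     """
--     out = []
--     at_word_start = True
--     for ch in word:
--         if ch == '-':
--             out.append('-')
--             at_word_start = True
--         else:
--             out.append(ch.upper() if at_word_start else ch.lower())
--             at_word_start = False
--     return ''.join(out)
-- ===== Notes on version B (the rewrite author's own statement) =====
-- stated objective: alternative
-- what changed: Replaces the hyphen-split/per-part capitalize/join with a single character-level pass that tracks a word-start flag reset at each hyphen.
import Mathlib
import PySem

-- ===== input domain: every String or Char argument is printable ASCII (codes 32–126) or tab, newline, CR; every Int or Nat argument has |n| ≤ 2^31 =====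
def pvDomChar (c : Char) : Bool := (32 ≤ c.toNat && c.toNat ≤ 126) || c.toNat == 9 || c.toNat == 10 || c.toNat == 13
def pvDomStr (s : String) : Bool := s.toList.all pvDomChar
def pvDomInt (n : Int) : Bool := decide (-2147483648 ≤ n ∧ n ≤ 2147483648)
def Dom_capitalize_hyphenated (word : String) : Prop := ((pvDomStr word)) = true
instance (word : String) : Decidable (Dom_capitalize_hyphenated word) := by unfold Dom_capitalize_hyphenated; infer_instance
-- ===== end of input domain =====

-- B replaces A's split('-')/per-part capitalize/join by one character pass with a word-start flag (alternative decomposition, same cost).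


-- ===== PORT A =====
-- transliteration of A over List Char via PySem.Chars (the Str functions are thin wrappers over these)
def capitalize_hyphenated (word : String) : String :=
  let parts := PySem.Chars.splitOn word.toList ['-']
  let capitalized := parts.foldl (fun acc part =>
    if part ≠ [] then
      acc ++ [if 1 < part.length then
                ((PySem.List.pyGet? part 0).map PySem.Chars.upperChar).toList
                  ++ PySem.Chars.lower (PySem.List.slice part (some 1) none)
              else PySem.Chars.upper part]
    else acc ++ [[]]) []
  String.ofList (PySem.Chars.join ['-'] capitalized)

-- ===== PORT B =====
def capitalize_hyphenated_alt (word : String) : String :=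
  let res := word.toList.foldl (fun (st : List Char × Bool) ch =>
    if ch = '-' then (st.1 ++ ['-'], true)
    else (st.1 ++ [if st.2 then PySem.Chars.upperChar ch else PySem.Chars.lowerChar ch], false))
    ([], true)
  String.ofList res.1

-- ===== PRECONDITION & SPEC =====
def Spec_capitalize_hyphenated (word : String) (out : String) : Prop := out = capitalize_hyphenated_alt word
instance (word : String) (out : String) : Decidable (Spec_capitalize_hyphenated word out) := by unfold Spec_capitalize_hyphenated; infer_instance

-- ===== CLAIM (what is proved, stated in full; the proofs are below) =====
def Claim_equal_capitalize_hyphenated : Prop := ∀ (word : String), Dom_capitalize_hyphenated word → Spec_capitalize_hyphenated word (capitalize_hyphenated word)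

-- ===== LEMMAS AND PROOFS =====

-- a simple structural single-character splitter; shown equal to Chars.splitOn · ['-'] below
def pvSp : List Char → List (List Char)
  | [] => [[]]
  | c :: rest =>
    if c = '-' then [] :: pvSp rest
    else match pvSp rest with
      | p :: ps => (c :: p) :: ps
      | [] => [[c]]

lemma pvSp_ne_nil (cs : List Char) : pvSp cs ≠ [] := by
  cases cs with
  | nil => simp [pvSp]
  | cons c rest =>
    simp only [pvSp]
    split
    · simp
    · cases h : pvSp rest <;> simp

lemma splitOn_go_eq (fuel : Nat) : ∀ (l cur : List Char) (out : List (List Char)),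
    l.length < fuel →
    PySem.Chars.splitOn.go ['-'] fuel l cur out.reverse =
      out ++ (cur.reverse ++ (pvSp l).headI) :: (pvSp l).tail := by
  induction fuel with
  | zero => intro l cur out h; omega
  | succ n ih =>
    intro l cur out h
    cases l with
    | nil =>
      simp [PySem.Chars.splitOn.go, pvSp]
    | cons c rest =>
      by_cases hc : c = '-'
      · subst hc
        have hstep : PySem.Chars.splitOn.go ['-'] (n+1) ('-' :: rest) cur out.reverse
            = PySem.Chars.splitOn.go ['-'] n rest [] (cur.reverse :: out.reverse) := by
          simp [PySem.Chars.splitOn.go, List.isPrefixOf]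
        rw [hstep]
        have h2 : (cur.reverse :: out.reverse) = (out ++ [cur.reverse]).reverse := by simp
        rw [h2, ih rest [] (out ++ [cur.reverse]) (by simp at h ⊢; omega)]
        have hco := pvSp_ne_nil rest
        cases hsp : pvSp rest with
        | nil => exact absurd hsp hco
        | cons p ps => simp [pvSp, hsp]
      · have hstep : PySem.Chars.splitOn.go ['-'] (n+1) (c :: rest) cur out.reverse
            = PySem.Chars.splitOn.go ['-'] n rest (c :: cur) out.reverse := by
          simp only [PySem.Chars.splitOn.go, List.isPrefixOf]
          split
          · rename_i hpre
            have h1 : '-' = c := by simpa using hpre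
            exact absurd h1.symm hc
          · rfl
        rw [hstep, ih rest (c :: cur) out (by simp at h ⊢; omega)]
        have hne := pvSp_ne_nil rest
        cases hsp : pvSp rest with
        | nil => exact absurd hsp hne
        | cons p ps => simp [pvSp, hc, hsp]

lemma splitOn_eq_pvSp (cs : List Char) : PySem.Chars.splitOn cs ['-'] = pvSp cs := by
  have h := splitOn_go_eq (cs.length + 1) cs [] [] (by omega)
  simp only [List.reverse_nil, List.nil_append] at h
  unfold PySem.Chars.splitOn
  rw [h]
  have hne := pvSp_ne_nil cs
  cases hsp : pvSp cs with
  | nil => exact absurd hsp hne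
  | cons p ps => simp

-- the per-part transform A applies (both of A's non-empty branches compute head-upper ++ tail-lower)
def pvFu : List Char → List Char
  | [] => []
  | c :: rest => PySem.Chars.upperChar c :: PySem.Chars.lower rest

lemma pvFu_eq_branch (part : List Char) (hp : part ≠ []) :
    (if 1 < part.length then
        ((PySem.List.pyGet? part 0).map PySem.Chars.upperChar).toList
          ++ PySem.Chars.lower (PySem.List.slice part (some 1) none)
      else PySem.Chars.upper part) = pvFu part := by
  cases part with
  | nil => exact absurd rfl hp
  | cons c rest =>
    cases rest with
    | nil => simp [pvFu, PySem.Chars.upper, PySem.Chars.lower]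
    | cons d rs =>
      simp [pvFu, PySem.List.pyGet?, PySem.List.pyIdx?, PySem.List.slice_from,
        PySem.Chars.lower, show (0:Int) ≤ (rs.length:Int) + 1 by positivity]

lemma foldl_eq_map_pvFu (l : List (List Char)) : ∀ (acc : List (List Char)),
    l.foldl (fun acc part =>
      if part ≠ [] then
        acc ++ [if 1 < part.length then
                  ((PySem.List.pyGet? part 0).map PySem.Chars.upperChar).toList
                    ++ PySem.Chars.lower (PySem.List.slice part (some 1) none)
                else PySem.Chars.upper part]
      else acc ++ [[]]) acc = acc ++ l.map pvFu := by
  induction l with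
  | nil => intro acc; simp
  | cons p ps ih =>
    intro acc
    rw [List.foldl_cons]
    by_cases hp : p = []
    · rw [if_neg (not_not_intro hp), ih]
      subst hp; simp [pvFu]
    · rw [if_pos hp, ih, pvFu_eq_branch p hp]
      simp

-- B's loop body as a structural recursion
def pvBgo : List Char → Bool → List Char
  | [], _ => []
  | c :: rest, st =>
    if c = '-' then '-' :: pvBgo rest true
    else (if st then PySem.Chars.upperChar c else PySem.Chars.lowerChar c) :: pvBgo rest false

lemma foldl_eq_pvBgo (cs : List Char) : ∀ (acc : List Char) (st : Bool),
    (cs.foldl (fun (s : List Char × Bool) ch =>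
      if ch = '-' then (s.1 ++ ['-'], true)
      else (s.1 ++ [if s.2 then PySem.Chars.upperChar ch else PySem.Chars.lowerChar ch], false))
      (acc, st)).1 = acc ++ pvBgo cs st := by
  induction cs with
  | nil => intro acc st; simp [pvBgo]
  | cons c rest ih =>
    intro acc st
    by_cases hc : c = '-'
    · subst hc; simp only [List.foldl_cons, ih]; simp [pvBgo]
    · simp only [List.foldl_cons, if_neg hc, pvBgo, ih]; simp

lemma join_cons_inner (a : Char) (p : List Char) (ps : List (List Char)) :
    PySem.Chars.join ['-'] ((a :: p) :: ps) = a :: PySem.Chars.join ['-'] (p :: ps) := by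
  cases ps with
  | nil => rw [PySem.Chars.join_singleton, PySem.Chars.join_singleton]
  | cons q qs => rw [PySem.Chars.join_cons_cons, PySem.Chars.join_cons_cons]; simp

lemma pvBgo_eq_join (cs : List Char) : ∀ (st : Bool),
    pvBgo cs st =
      PySem.Chars.join ['-']
        ((if st then pvFu (pvSp cs).headI else PySem.Chars.lower (pvSp cs).headI)
          :: (pvSp cs).tail.map pvFu) := by
  induction cs with
  | nil =>
    intro st
    cases st <;> simp [pvBgo, pvSp, pvFu, PySem.Chars.lower, PySem.Chars.join_singleton]
  | cons c rest ih =>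
    intro st
    by_cases hc : c = '-'
    · subst hc
      simp only [pvBgo, pvSp, List.headI, List.tail]
      rw [ih true]
      have hne := pvSp_ne_nil rest
      cases hsp : pvSp rest with
      | nil => exact absurd hsp hne
      | cons p ps =>
        cases st <;>
          simp [PySem.Chars.join_cons_cons, PySem.Chars.lower, pvFu]
    · have hne := pvSp_ne_nil rest
      cases hsp : pvSp rest with
      | nil => exact absurd hsp hne
      | cons p ps =>
        have hsp' : pvSp (c :: rest) = (c :: p) :: ps := by simp [pvSp, hc, hsp]
        simp only [pvBgo, if_neg hc, hsp', List.headI, List.tail]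
        rw [ih false, hsp]
        cases st with
        | true =>
          simpa [pvFu] using
            (join_cons_inner (PySem.Chars.upperChar c) (PySem.Chars.lower p) (List.map pvFu ps)).symm
        | false =>
          simpa [PySem.Chars.lower] using
            (join_cons_inner (PySem.Chars.lowerChar c) (PySem.Chars.lower p) (List.map pvFu ps)).symm

-- ===== VERDICT (by name: the statement is the Claim_ definition above) =====
theorem capitalize_hyphenated_spec : Claim_equal_capitalize_hyphenated := by
  intro word _
  unfold Spec_capitalize_hyphenated capitalize_hyphenated capitalize_hyphenated_alt
  dsimp only
  rw [foldl_eq_pvBgo, pvBgo_eq_join, splitOn_eq_pvSp, foldl_eq_map_pvFu]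
  have hne := pvSp_ne_nil word.toList
  cases hsp : pvSp word.toList with
  | nil => exact absurd hsp hne
  | cons p ps => simp
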